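-- pv_equiv track=rewrite | github.com/981377660LMT/algorithm-study | 4_set/滚动替换更新/所有子集可能的异或数-子序列.py | solve
-- ===== SOURCE A (Python) =====
-- def solve(nums):
--     res = set()
--     dp = set()
--     for num in nums:
--         ndp = {num | pre for pre in dp} | {num}
--         res |= ndp
--         dp = ndp
--     return len(res)
-- ===== SOURCE B (Python) =====
-- def solve(nums):
--     res = set()
--     n = len(nums)
--     for i in range(n):
--         cur = 0
--         for j in range(i, n):
--             cur |= nums[j]
--             res.add(cur)
--     return len(res)
-- ===== Notes on version B (the rewrite author's own statement) =====
-- stated objective: simpler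
-- what changed: Replaces the rolling dp-set of ORs of subarrays ending at each position with a plain brute-force double loop that rescans every subarray, accumulating its OR and inserting it into one result set.
import Mathlib
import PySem

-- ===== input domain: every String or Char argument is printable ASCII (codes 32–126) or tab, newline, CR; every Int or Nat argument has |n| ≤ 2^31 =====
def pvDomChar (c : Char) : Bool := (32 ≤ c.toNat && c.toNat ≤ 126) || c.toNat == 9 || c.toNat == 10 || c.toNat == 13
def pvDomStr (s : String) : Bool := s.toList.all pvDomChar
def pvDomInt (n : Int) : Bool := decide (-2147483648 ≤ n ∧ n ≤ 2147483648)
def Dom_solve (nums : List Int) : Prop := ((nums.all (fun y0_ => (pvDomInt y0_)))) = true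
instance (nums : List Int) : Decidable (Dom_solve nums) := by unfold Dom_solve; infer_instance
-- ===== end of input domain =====

-- B replaces the rolling dp-set of subarray-ORs by a brute-force double loop over subarrays (simpler; not faster).

-- ===== PORT A =====
def solve (nums : List Int) : Int :=
  let st := nums.foldl
    (fun (st : PySem.Set Int × PySem.Set Int) num =>
      let ndp := PySem.Set.union
        (PySem.Set.ofList (st.2.map (fun pre => PySem.Int.bor num pre)))
        (PySem.Set.ofList [num])
      (PySem.Set.union st.1 ndp, ndp))
    (PySem.Set.empty, PySem.Set.empty)
  PySem.Set.len st.1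

-- ===== PORT B =====
def solve_alt (nums : List Int) : Int :=
  let n := PySem.List.len nums
  let res := (PySem.List.pyRange 0 n).foldl
    (fun (res : PySem.Set Int) i =>
      ((PySem.List.pyRange i n).foldl
        (fun (p : PySem.Set Int × Int) j =>
          let cur := PySem.Int.bor p.2 (PySem.List.pyGetD nums j 0)
          (PySem.Set.add p.1 cur, cur))
        (res, 0)).1)
    PySem.Set.empty
  PySem.Set.len res

-- ===== PRECONDITION & SPEC =====
def Spec_solve (nums : List Int) (out : Int) : Prop := out = solve_alt nums
instance (nums : List Int) (out : Int) : Decidable (Spec_solve nums out) := by unfold Spec_solve; infer_instance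

-- ===== CLAIM (what is proved, stated in full; the proofs are below) =====
def Claim_equal_solve : Prop := ∀ (nums : List Int), Dom_solve nums → Spec_solve nums (solve nums)

-- ===== LEMMAS AND PROOFS =====

-- OR of the length-k segment of nums starting at i, accumulated onto c
def pvSegOr (nums : List Int) (c : Int) (i k : Nat) : Int :=
  ((nums.drop i).take k).foldl PySem.Int.bor c

-- the canonical description of the answer set: ORs of nonempty contiguous subarrays
def pvP (nums : List Int) (x : Int) : Prop :=
  ∃ i k : Nat, 0 < k ∧ i + k ≤ nums.length ∧ x = pvSegOr nums 0 i k

lemma pvSegOr_zero (nums : List Int) (c : Int) (i : Nat) : pvSegOr nums c i 0 = c := rfl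

lemma pvSegOr_append (ys : List Int) (y : Int) (c : Int) (i k : Nat) (h : i + k ≤ ys.length) :
    pvSegOr (ys ++ [y]) c i k = pvSegOr ys c i k := by
  unfold pvSegOr
  rw [List.drop_append_of_le_length (by omega),
      List.take_append_of_le_length (by simp; omega)]

lemma pvSegOr_cons_step (nums : List Int) (c : Int) (i k : Nat) (h : i < nums.length) :
    pvSegOr nums c i (k + 1)
      = pvSegOr nums (PySem.Int.bor c (nums.getD i 0)) (i + 1) k := by
  unfold pvSegOr
  rw [List.getD_eq_getElem _ _ h, List.drop_eq_getElem_cons h, List.take_succ_cons,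
    List.foldl_cons]

lemma pvSegOr_suffix_append (ys : List Int) (y : Int) (i : Nat) (h : i ≤ ys.length) :
    pvSegOr (ys ++ [y]) 0 i (ys.length + 1 - i)
      = PySem.Int.bor (pvSegOr ys 0 i (ys.length - i)) y := by
  unfold pvSegOr
  rw [List.drop_append_of_le_length h,
      List.take_of_length_le (by simp; omega),
      List.take_of_length_le (by simp),
      List.foldl_append, List.foldl_cons, List.foldl_nil]

-- state of A's fold after processing nums
def pvA (nums : List Int) : PySem.Set Int × PySem.Set Int :=
  nums.foldl
    (fun (st : PySem.Set Int × PySem.Set Int) num =>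
      let ndp := PySem.Set.union
        (PySem.Set.ofList (st.2.map (fun pre => PySem.Int.bor num pre)))
        (PySem.Set.ofList [num])
      (PySem.Set.union st.1 ndp, ndp))
    (PySem.Set.empty, PySem.Set.empty)

lemma pvA_invariant (nums : List Int) :
    (pvA nums).1.Nodup ∧ (pvA nums).2.Nodup ∧
    (∀ x, x ∈ (pvA nums).2 ↔ ∃ i, i < nums.length ∧ x = pvSegOr nums 0 i (nums.length - i)) ∧
    (∀ x, x ∈ (pvA nums).1 ↔ pvP nums x) := by
  induction nums using List.reverseRecOn with
  | nil =>
    refine ⟨List.nodup_nil, List.nodup_nil, ?_, ?_⟩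
    · intro x; simp [pvA]
    · intro x; simp [pvA, pvP]
  | append_singleton ys y ih =>
    obtain ⟨hres, hdp, hdpc, hresc⟩ := ih
    have hstep : pvA (ys ++ [y]) =
        (PySem.Set.union (pvA ys).1
          (PySem.Set.union
            (PySem.Set.ofList ((pvA ys).2.map (fun pre => PySem.Int.bor y pre)))
            (PySem.Set.ofList [y])),
         PySem.Set.union
            (PySem.Set.ofList ((pvA ys).2.map (fun pre => PySem.Int.bor y pre)))
            (PySem.Set.ofList [y])) := by
      unfold pvA; rw [List.foldl_append, List.foldl_cons, List.foldl_nil]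
    have hdp' : ∀ x, x ∈ (pvA (ys ++ [y])).2 ↔
        ∃ i, i < (ys ++ [y]).length ∧ x = pvSegOr (ys ++ [y]) 0 i ((ys ++ [y]).length - i) := by
      intro x
      rw [hstep]
      simp only [PySem.Set.mem_union, PySem.Set.mem_ofList, List.mem_map,
        List.length_append, List.length_singleton, List.mem_singleton]
      constructor
      · rintro (⟨pre, hpre, rfl⟩ | hxy)
        · obtain ⟨i, hi, rfl⟩ := (hdpc pre).mp hpre
          refine ⟨i, by omega, ?_⟩
          rw [pvSegOr_suffix_append ys y i (by omega), PySem.Int.bor_comm]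
        · refine ⟨ys.length, by omega, ?_⟩
          have hseg : pvSegOr (ys ++ [y]) 0 ys.length 1 = y := by
            unfold pvSegOr
            rw [List.drop_append_of_le_length (le_refl _), List.drop_length,
              List.nil_append, List.take_of_length_le (by simp), List.foldl_cons,
              List.foldl_nil, PySem.Int.bor_comm, PySem.Int.bor_zero]
          rw [show ys.length + 1 - ys.length = 1 by omega, hseg]
          exact hxy
      · rintro ⟨i, hi, rfl⟩
        by_cases hiL : i < ys.length
        · left
          exact ⟨pvSegOr ys 0 i (ys.length - i), (hdpc _).mpr ⟨i, hiL, rfl⟩,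
            by rw [pvSegOr_suffix_append ys y i (by omega), PySem.Int.bor_comm]⟩
        · right
          have hie : i = ys.length := by omega
          subst hie
          rw [show ys.length + 1 - ys.length = 1 by omega]
          unfold pvSegOr
          rw [List.drop_append_of_le_length (le_refl _), List.drop_length,
            List.nil_append, List.take_of_length_le (by simp), List.foldl_cons,
            List.foldl_nil, PySem.Int.bor_comm, PySem.Int.bor_zero]
    refine ⟨?_, ?_, hdp', ?_⟩
    · rw [hstep]; exact PySem.Set.nodup_union _ _ hres
    · rw [hstep]; exact PySem.Set.nodup_union _ _ (PySem.Set.nodup_ofList _)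
    · intro x
      have hmem : x ∈ (pvA (ys ++ [y])).1 ↔ x ∈ (pvA ys).1 ∨ x ∈ (pvA (ys ++ [y])).2 := by
        rw [hstep]
        simp only [PySem.Set.mem_union]
      rw [hmem, hresc x, hdp' x]
      unfold pvP
      constructor
      · rintro (⟨i, k, hk, hik, rfl⟩ | ⟨i, hi, rfl⟩)
        · exact ⟨i, k, hk, by simp; omega, (pvSegOr_append ys y 0 i k hik).symm⟩
        · exact ⟨i, (ys ++ [y]).length - i, by simp at hi ⊢; omega, by omega, rfl⟩
      · rintro ⟨i, k, hk, hik, rfl⟩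
        simp only [List.length_append, List.length_singleton] at hik
        by_cases hin : i + k ≤ ys.length
        · exact Or.inl ⟨i, k, hk, hin, pvSegOr_append ys y 0 i k hin⟩
        · refine Or.inr ⟨i, by simp; omega, ?_⟩
          rw [show (ys ++ [y]).length - i = k by simp; omega]

-- result set of B's inner loop starting at index i with accumulator cur
def pvBInner (nums : List Int) (res : PySem.Set Int) (cur : Int) (i : Int) :
    PySem.Set Int × Int :=
  (PySem.List.pyRange i (PySem.List.len nums)).foldl
    (fun (p : PySem.Set Int × Int) j =>
      let cur := PySem.Int.bor p.2 (PySem.List.pyGetD nums j 0)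
      (PySem.Set.add p.1 cur, cur))
    (res, cur)

-- result set of B's outer loop starting at index m
def pvBOuter (nums : List Int) (res : PySem.Set Int) (m : Int) : PySem.Set Int :=
  (PySem.List.pyRange m (PySem.List.len nums)).foldl
    (fun (res : PySem.Set Int) i => (pvBInner nums res 0 i).1)
    res

lemma pvB_inner (nums : List Int) (res : PySem.Set Int) (cur : Int) (i : Nat)
    (hres : res.Nodup) :
    (pvBInner nums res cur (i : Int)).1.Nodup ∧
    ∀ x, x ∈ (pvBInner nums res cur (i : Int)).1 ↔ x ∈ res ∨
      ∃ k, 0 < k ∧ i + k ≤ nums.length ∧ x = pvSegOr nums cur i k := by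
  induction hd : nums.length - i generalizing res cur i with
  | zero =>
    have hnil : PySem.List.pyRange (i : Int) (PySem.List.len nums) = [] := by
      apply PySem.List.pyRange_one_eq_nil
      simp [PySem.List.len_eq]; omega
    unfold pvBInner
    rw [hnil, List.foldl_nil]
    exact ⟨hres, fun x => ⟨Or.inl, fun h => by
      rcases h with h | ⟨k, hk, hik, _⟩
      · exact h
      · omega⟩⟩
  | succ d ihd =>
    have hin : i < nums.length := by omega
    have hcons : PySem.List.pyRange (i : Int) (PySem.List.len nums)
        = (i : Int) :: PySem.List.pyRange ((i : Int) + 1) (PySem.List.len nums) := by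
      apply PySem.List.pyRange_one_cons
      simp [PySem.List.len_eq]; omega
    have hstep : pvBInner nums res cur (i : Int)
        = pvBInner nums (PySem.Set.add res (PySem.Int.bor cur (nums.getD i 0)))
            (PySem.Int.bor cur (nums.getD i 0)) ((i + 1 : Nat) : Int) := by
      unfold pvBInner
      rw [hcons, List.foldl_cons]
      simp only [PySem.List.pyGetD_natCast]
      norm_num
    rw [hstep]
    obtain ⟨hnd, hch⟩ := ihd (PySem.Set.add res (PySem.Int.bor cur (nums.getD i 0)))
      (PySem.Int.bor cur (nums.getD i 0)) (i + 1) (PySem.Set.nodup_add _ _ hres) (by omega)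
    refine ⟨hnd, fun x => ?_⟩
    rw [hch x, PySem.Set.mem_add]
    have hc1 : PySem.Int.bor cur (nums.getD i 0) = pvSegOr nums cur i 1 := by
      rw [pvSegOr_cons_step nums cur i 0 hin, pvSegOr_zero]
    constructor
    · rintro ((h | rfl) | ⟨k, hk, hik, rfl⟩)
      · exact Or.inl h
      · exact Or.inr ⟨1, by omega, by omega, hc1⟩
      · exact Or.inr ⟨k + 1, by omega, by omega, (pvSegOr_cons_step nums cur i k hin).symm⟩
    · rintro (h | ⟨k, hk, hik, rfl⟩)
      · exact Or.inl (Or.inl h)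
      · match k, hk with
        | 1, _ => exact Or.inl (Or.inr hc1.symm)
        | (k' + 2), _ =>
          refine Or.inr ⟨k' + 1, by omega, by omega, ?_⟩
          rw [pvSegOr_cons_step nums cur i (k' + 1) hin]
    
lemma pvB_outer (nums : List Int) (res : PySem.Set Int) (m : Nat) (hres : res.Nodup) :
    (pvBOuter nums res (m : Int)).Nodup ∧
    ∀ x, x ∈ pvBOuter nums res (m : Int) ↔ x ∈ res ∨
      ∃ i k : Nat, m ≤ i ∧ 0 < k ∧ i + k ≤ nums.length ∧ x = pvSegOr nums 0 i k := by
  induction hd : nums.length - m generalizing res m with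
  | zero =>
    have hnil : PySem.List.pyRange (m : Int) (PySem.List.len nums) = [] := by
      apply PySem.List.pyRange_one_eq_nil
      simp [PySem.List.len_eq]; omega
    unfold pvBOuter
    rw [hnil, List.foldl_nil]
    exact ⟨hres, fun x => ⟨Or.inl, fun h => by
      rcases h with h | ⟨i, k, hmi, hk, hik, _⟩
      · exact h
      · omega⟩⟩
  | succ d ihd =>
    have hin : m < nums.length := by omega
    have hcons : PySem.List.pyRange (m : Int) (PySem.List.len nums)
        = (m : Int) :: PySem.List.pyRange ((m : Int) + 1) (PySem.List.len nums) := by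
      apply PySem.List.pyRange_one_cons
      simp [PySem.List.len_eq]; omega
    have hstep : pvBOuter nums res (m : Int)
        = pvBOuter nums (pvBInner nums res 0 (m : Int)).1 ((m + 1 : Nat) : Int) := by
      unfold pvBOuter
      rw [hcons, List.foldl_cons]
      norm_num
    obtain ⟨hnd1, hch1⟩ := pvB_inner nums res 0 m hres
    rw [hstep]
    obtain ⟨hnd, hch⟩ := ihd (pvBInner nums res 0 (m : Int)).1 (m + 1) hnd1 (by omega)
    refine ⟨hnd, fun x => ?_⟩
    rw [hch x, hch1 x]
    constructor
    · rintro ((h | ⟨k, hk, hik, rfl⟩) | ⟨i, k, hmi, hk, hik, rfl⟩)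
      · exact Or.inl h
      · exact Or.inr ⟨m, k, by omega, hk, hik, rfl⟩
      · exact Or.inr ⟨i, k, by omega, hk, hik, rfl⟩
    · rintro (h | ⟨i, k, hmi, hk, hik, rfl⟩)
      · exact Or.inl (Or.inl h)
      · by_cases him : i = m
        · subst him; exact Or.inl (Or.inr ⟨k, hk, hik, rfl⟩)
        · exact Or.inr ⟨i, k, by omega, hk, hik, rfl⟩

-- ===== VERDICT (by name: the statement is the Claim_ definition above) =====
theorem solve_spec : Claim_equal_solve := by
  intro nums _
  unfold Spec_solve
  have hA : solve nums = PySem.Set.len (pvA nums).1 := rfl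
  have hB : solve_alt nums = PySem.Set.len (pvBOuter nums PySem.Set.empty ((0 : Nat) : Int)) := rfl
  obtain ⟨hAnd, _, _, hAch⟩ := pvA_invariant nums
  obtain ⟨hBnd, hBch⟩ := pvB_outer nums PySem.Set.empty 0 List.nodup_nil
  have hperm : (pvA nums).1.Perm (pvBOuter nums PySem.Set.empty ((0 : Nat) : Int)) := by
    rw [List.perm_ext_iff_of_nodup hAnd hBnd]
    intro x
    rw [hAch x, hBch x]
    unfold pvP
    constructor
    · rintro ⟨i, k, hk, hik, rfl⟩
      exact Or.inr ⟨i, k, by omega, hk, hik, rfl⟩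
    · rintro (h | ⟨i, k, _, hk, hik, rfl⟩)
      · simp [PySem.Set.empty] at h
      · exact ⟨i, k, hk, hik, rfl⟩
  rw [hA, hB]
  unfold PySem.Set.len
  rw [hperm.length_eq]
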